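-- pv_equiv track=rewrite | github.com/weiwang0927/CLOUD | dataprocessing/get_similar.py | sort_dict_get_key
-- ===== SOURCE A (Python) =====
-- def sort_dict_get_key(dict, k):
--     final_results = []
--     sorted_dict = sorted([(k,v) for k,v in dict.items()], reverse=True)
--     tmp_set = set()
--     for item in sorted_dict:
--         tmp_set.add(item[1])
--     for list_ltem in sorted(tmp_set, reverse=True)[:k]:
--         for dic_item in sorted_dict:
--             if dic_item[1] == list_ltem:
--                 final_results.append(dic_item[0])
--     final_results = final_results[0:k]
--     return final_results
-- ===== SOURCE B (Python) =====
-- def sort_dict_get_key(dict, k):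
--     # Single membership-filtered pass over a value-major ordering, instead of
--     # A's per-distinct-value rescans of the key-sorted item list.
--     base = sorted(dict.items(), reverse=True)
--     values_desc = sorted(set(dict.values()), reverse=True)
--     selected = set(values_desc[:k])
--     ordered = sorted(base, key=lambda kv: kv[1], reverse=True)
--     return [key for key, val in ordered if val in selected][:k]
-- ===== Notes on version B (the rewrite author's own statement) =====
-- stated objective: alternative
-- what changed: Replaces A's nested loop that rescans the whole key-sorted item list once per top distinct value with one value-major stable re-sort of the items and a single membership-filtered pass over it (top-k distinct values kept in a set).
import Mathlib
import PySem

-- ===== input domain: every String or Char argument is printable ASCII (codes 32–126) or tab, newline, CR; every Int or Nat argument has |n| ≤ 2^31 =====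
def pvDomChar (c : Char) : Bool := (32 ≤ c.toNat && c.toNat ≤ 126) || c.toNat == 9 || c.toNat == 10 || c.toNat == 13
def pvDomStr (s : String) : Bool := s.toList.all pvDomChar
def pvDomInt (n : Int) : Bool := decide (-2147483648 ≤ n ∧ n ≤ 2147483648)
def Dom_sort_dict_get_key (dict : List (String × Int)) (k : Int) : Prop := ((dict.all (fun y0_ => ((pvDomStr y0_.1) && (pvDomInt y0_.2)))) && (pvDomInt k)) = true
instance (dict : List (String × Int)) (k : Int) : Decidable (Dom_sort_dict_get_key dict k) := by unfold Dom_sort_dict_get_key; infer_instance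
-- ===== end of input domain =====

-- B replaces A's per-distinct-value rescans of the key-sorted item list by one value-major
-- re-sort and a single membership-filtered pass; same return value.
-- ===== PORT A =====
def sort_dict_get_key (dict : List (String × Int)) (k : Int) : List String :=
  let sorted_dict := PySem.List.sorted2 dict Prod.fst Prod.snd true
  let tmp_set := sorted_dict.foldl (fun s item => PySem.Set.add s item.2) PySem.Set.empty
  let final_results :=
    (PySem.List.slice (PySem.List.sorted tmp_set (fun v => v) true) none (some k)).foldl
      (fun acc list_ltem =>
        sorted_dict.foldl
          (fun acc2 dic_item => if dic_item.2 == list_ltem then acc2 ++ [dic_item.1] else acc2) acc)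
      []
  PySem.List.slice final_results (some 0) (some k)

-- ===== PORT B =====
def sort_dict_get_key_alt (dict : List (String × Int)) (k : Int) : List String :=
  let base := PySem.List.sorted2 dict Prod.fst Prod.snd true
  let values_desc := PySem.List.sorted (PySem.Set.ofList (dict.map (fun p => p.2))) (fun x => x) true
  let selected := PySem.Set.ofList (PySem.List.slice values_desc none (some k))
  let ordered := PySem.List.sorted base (fun p => p.2) true
  PySem.List.slice
    ((ordered.filter (fun p => PySem.Set.contains selected p.2)).map (fun p => p.1))
    none (some k)

-- ===== PRECONDITION & SPEC =====
def Spec_sort_dict_get_key (dict : List (String × Int)) (k : Int) (out : List String) : Prop := out = sort_dict_get_key_alt dict k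
instance (dict : List (String × Int)) (k : Int) (out : List String) : Decidable (Spec_sort_dict_get_key dict k out) := by unfold Spec_sort_dict_get_key; infer_instance

-- ===== CLAIM (what is proved, stated in full; the proofs are below) =====
def Claim_equal_sort_dict_get_key : Prop := ∀ (dict : List (String × Int)) (k : Int), Dom_sort_dict_get_key dict k → Spec_sort_dict_get_key dict k (sort_dict_get_key dict k)

-- ===== LEMMAS AND PROOFS =====

theorem insertBy_append_left {α : Type} (bef : α → α → Bool) (x : α) (pre rest : List α)
    (h : ∀ y ∈ pre, bef x y = false) :
    PySem.List.insertBy bef x (pre ++ rest) = pre ++ PySem.List.insertBy bef x rest := by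
  induction pre with
  | nil => simp
  | cons a t ih =>
    simp only [List.cons_append, PySem.List.insertBy, h a (by simp)]
    simp [ih (fun y hy => h y (by simp [hy]))]

theorem insertBy_all_before {α : Type} (bef : α → α → Bool) (x : α) (rest : List α)
    (h : ∀ y ∈ rest, bef x y = true) :
    PySem.List.insertBy bef x rest = x :: rest := by
  cases rest with
  | nil => rfl
  | cons a t => simp [PySem.List.insertBy, h a (by simp)]

theorem dropWhile_head_false {α : Type} (p : α → Bool) (l : List α) (d : α) (ds : List α)
    (h : l.dropWhile p = d :: ds) : p d = false := by
  have h2 : l.dropWhile p ≠ [] := by simp [h]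
  have := List.head_dropWhile_not p h2
  simpa [h] using this

-- sorted(set(xs), reverse=True) is strictly decreasing
theorem vals_pairwise_gt (xs : List Int) :
    List.Pairwise (fun a b => b < a) (PySem.List.sorted (PySem.Set.ofList xs) (fun v => v) true) := by
  have h1 := PySem.List.sorted_pairwise_rev (PySem.Set.ofList xs) (fun v => v)
  have hnd : (PySem.List.sorted (PySem.Set.ofList xs) (fun v => v) true).Nodup :=
    ((PySem.List.sorted_perm (PySem.Set.ofList xs) (fun v => v) true).nodup_iff).mpr
      (PySem.Set.nodup_ofList xs)
  exact (List.Pairwise.and hnd h1).imp (fun h => lt_of_le_of_ne h.2 (Ne.symm h.1))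

-- the stable descending sort groups the list by its distinct key values in descending order
theorem sorted_rev_groups {α : Type} (l : List α) (f : α → Int) :
    PySem.List.sorted l f true =
      (PySem.List.sorted (PySem.Set.ofList (l.map f)) (fun v => v) true).flatMap
        (fun v => l.filter (fun y => f y == v)) := by
  induction l using List.reverseRecOn with
  | nil => rfl
  | append_singleton l x ih =>
    set S := PySem.Set.ofList (l.map f) with hS
    set vals := PySem.List.sorted S (fun v => v) true with hvals
    set g : Int → List α := fun v => l.filter (fun y => f y == v) with hg
    set bef : α → α → Bool := fun a b => decide (f b < f a) with hbef
    have hLHS : PySem.List.sorted (l ++ [x]) f true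
        = PySem.List.insertBy bef x (vals.flatMap g) := by
      rw [PySem.List.sorted_rev_eq_foldl_insertBy, List.foldl_append,
          ← PySem.List.sorted_rev_eq_foldl_insertBy, ih]
      rfl
    have hset : PySem.Set.ofList ((l ++ [x]).map f) = PySem.Set.add S (f x) := by
      rw [List.map_append, PySem.Set.ofList_eq_foldl, List.foldl_append,
          ← PySem.Set.ofList_eq_foldl]
      rfl
    have hg' : ∀ v : Int, (l ++ [x]).filter (fun y => f y == v)
        = g v ++ (if f x = v then [x] else []) := by
      intro v
      rw [List.filter_append]
      by_cases h : f x = v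
      · simp [hg, List.filter, h]
      · have hb : (f x == v) = false := by simp [h]
        simp [hg, List.filter, hb, h]
    have hPW : List.Pairwise (fun a b => b < a) vals := vals_pairwise_gt (l.map f)
    have hgval : ∀ v y, y ∈ g v → f y = v := by
      intro v y hy; have := List.of_mem_filter hy; simpa using this
    rw [hLHS, hset]
    by_cases hmem : f x ∈ vals
    · -- value already present: set unchanged, x goes to the end of its group
      have hxS : f x ∈ S := (PySem.List.mem_sorted _ _ _ _).mp hmem
      rw [PySem.Set.add_of_mem hxS, ← hvals]
      obtain ⟨L₁, L₂, hsp⟩ := List.append_of_mem hmem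
      rw [hsp]
      have hPW' := hsp ▸ hPW
      rcases List.pairwise_append.mp hPW' with ⟨pw1, pw2, cross⟩
      have hL₂lt : ∀ v ∈ L₂, v < f x := (List.pairwise_cons.mp pw2).1
      have hL₁gt : ∀ a ∈ L₁, f x < a := fun a ha => cross a ha (f x) (by simp)
      rw [List.flatMap_append, List.flatMap_cons, List.flatMap_append, List.flatMap_cons]
      have e1 : L₁.flatMap (fun v => (l ++ [x]).filter (fun y => f y == v)) = L₁.flatMap g := by
        apply List.flatMap_congr; intro v hv
        rw [hg']
        have : f x ≠ v := ne_of_lt (hL₁gt v hv)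
        simp [this]
      have e2 : L₂.flatMap (fun v => (l ++ [x]).filter (fun y => f y == v)) = L₂.flatMap g := by
        apply List.flatMap_congr; intro v hv
        rw [hg']
        have : f x ≠ v := ne_of_gt (hL₂lt v hv)
        simp [this]
      rw [e1, e2, hg']
      rw [← List.append_assoc]
      rw [insertBy_append_left]
      · rw [insertBy_all_before]
        · simp
        · intro y hy
          obtain ⟨v, hv, hyv⟩ := List.mem_flatMap.mp hy
          have := hgval v y hyv
          simp [hbef, this]
          exact hL₂lt v hv
      · intro y hy
        rcases List.mem_append.mp hy with h1 | h2
        · obtain ⟨v, hv, hyv⟩ := List.mem_flatMap.mp h1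
          have := hgval v y hyv
          simp [hbef, this]
          exact le_of_lt (hL₁gt v hv)
        · have := hgval (f x) y h2
          simp [hbef, this]
    · -- fresh value: a new singleton group lands between the larger and the smaller values
      have hxS : f x ∉ S := fun h => hmem ((PySem.List.mem_sorted _ _ _ _).mpr h)
      have hfresh : f x ∉ l.map f := fun h => hxS ((PySem.Set.mem_ofList _ _).mpr h)
      have hadd : PySem.Set.add S (f x) = S ++ [f x] := by
        simp [PySem.Set.add, PySem.Set.contains, hxS]
      set T := vals.takeWhile (fun v => decide (f x < v)) with hT
      set D := vals.dropWhile (fun v => decide (f x < v)) with hD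
      have hTD : T ++ D = vals := List.takeWhile_append_dropWhile
      have hTgt : ∀ v ∈ T, f x < v := by
        intro v hv; have := List.mem_takeWhile_imp hv; simpa using this
      have hDmem : ∀ v ∈ D, v ∈ vals := by
        intro v hv; rw [← hTD]; exact List.mem_append_right _ hv
      have hDlt : ∀ v ∈ D, v < f x := by
        cases hDc : D with
        | nil => simp
        | cons d ds =>
          have hd1 : ¬ (f x < d) := by
            have := dropWhile_head_false (fun v => decide (f x < v)) vals d ds (hD ▸ hDc)
            simpa using this
          have hdmem : d ∈ vals := hDmem d (by rw [hDc]; simp)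
          have hdne : d ≠ f x := fun h => hmem (h ▸ hdmem)
          have hdlt : d < f x := lt_of_le_of_ne (not_lt.mp hd1) hdne
          have pwD : List.Pairwise (fun a b => b < a) D := hPW.sublist (hD ▸ List.dropWhile_sublist _)
          rw [hDc] at pwD
          intro v hv
          rcases List.mem_cons.mp hv with rfl | hv2
          · exact hdlt
          · exact lt_trans ((List.pairwise_cons.mp pwD).1 v hv2) hdlt
      have hvals' : PySem.List.sorted (S ++ [f x]) (fun v => v) true = T ++ f x :: D := by
        apply PySem.List.sorted_rev_eq_of_perm_of_pairwise_gt
        · have p1 : (T ++ f x :: D).Perm (f x :: (T ++ D)) := List.perm_middle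
          rw [hTD] at p1
          have p2 : (f x :: vals).Perm (f x :: S) := (PySem.List.sorted_perm _ _ _).cons _
          have p3 : (f x :: S).Perm (S ++ [f x]) := (List.perm_append_singleton _ _).symm
          exact p1.trans (p2.trans p3)
        · rw [List.pairwise_append]
          refine ⟨hPW.sublist (hT ▸ List.takeWhile_sublist _), ?_, ?_⟩
          · exact List.pairwise_cons.mpr ⟨hDlt, hPW.sublist (hD ▸ List.dropWhile_sublist _)⟩
          · intro a ha b hb
            rcases List.mem_cons.mp hb with rfl | hb2
            · exact hTgt a ha
            · exact lt_trans (hDlt b hb2) (hTgt a ha)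
      have hgfx : g (f x) = [] := by
        rw [hg]
        rw [List.filter_eq_nil_iff]
        intro y hy hyx
        exact hfresh (List.mem_map.mpr ⟨y, hy, by simpa using hyx⟩)
      rw [hadd, hvals']
      rw [List.flatMap_append, List.flatMap_cons]
      have e1 : T.flatMap (fun v => (l ++ [x]).filter (fun y => f y == v)) = T.flatMap g := by
        apply List.flatMap_congr; intro v hv
        rw [hg']
        have : f x ≠ v := ne_of_lt (hTgt v hv)
        simp [this]
      have e2 : D.flatMap (fun v => (l ++ [x]).filter (fun y => f y == v)) = D.flatMap g := by
        apply List.flatMap_congr; intro v hv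
        rw [hg']
        have : f x ≠ v := ne_of_gt (hDlt v hv)
        simp [this]
      rw [e1, e2, hg', hgfx]
      simp only [List.nil_append]
      rw [← hTD, List.flatMap_append]
      rw [insertBy_append_left]
      · rw [insertBy_all_before]
        · simp
        · intro y hy
          obtain ⟨v, hv, hyv⟩ := List.mem_flatMap.mp hy
          have := hgval v y hyv
          simp [hbef, this]
          exact hDlt v hv
      · intro y hy
        obtain ⟨v, hv, hyv⟩ := List.mem_flatMap.mp hy
        have := hgval v y hyv
        simp [hbef, this]
        exact le_of_lt (hTgt v hv)

-- the distinct values of dict and of its key-sorted rearrangement give the same descending list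
theorem vals_base_eq_vals_dict (dict : List (String × Int)) :
    PySem.List.sorted (PySem.Set.ofList ((PySem.List.sorted2 dict Prod.fst Prod.snd true).map Prod.snd)) (fun v => v) true
      = PySem.List.sorted (PySem.Set.ofList (dict.map Prod.snd)) (fun v => v) true := by
  apply PySem.List.sorted_rev_eq_of_perm_of_pairwise_gt
  · have hmemiff : ∀ a : Int, a ∈ dict.map Prod.snd
        ↔ a ∈ (PySem.List.sorted2 dict Prod.fst Prod.snd true).map Prod.snd := by
      intro a
      exact (((PySem.List.sorted2_perm dict Prod.fst Prod.snd true).map Prod.snd).mem_iff).symm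
    have hperm : (PySem.Set.ofList (dict.map Prod.snd)).Perm
        (PySem.Set.ofList ((PySem.List.sorted2 dict Prod.fst Prod.snd true).map Prod.snd)) := by
      rw [List.perm_ext_iff_of_nodup (PySem.Set.nodup_ofList _) (PySem.Set.nodup_ofList _)]
      intro a
      rw [PySem.Set.mem_ofList, PySem.Set.mem_ofList]
      exact hmemiff a
    exact (PySem.List.sorted_perm _ _ _).trans hperm
  · exact vals_pairwise_gt _

-- keeping only the groups of a nodup value list's prefix keeps exactly that prefix's groups
theorem flatMap_take_of_nodup {α : Type} (vals : List Int) (hnd : vals.Nodup)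
    (g : Int → List α) (n : Nat) :
    vals.flatMap (fun v => if v ∈ vals.take n then g v else [])
      = (vals.take n).flatMap g := by
  have hnd' := hnd
  rw [← List.take_append_drop n vals, List.nodup_append] at hnd'
  set t := vals.take n with ht
  have hsplit : vals = t ++ vals.drop n := by rw [ht, List.take_append_drop]
  rw [hsplit, List.flatMap_append]
  have h1 : t.flatMap (fun v => if v ∈ t then g v else [])
      = t.flatMap g := List.flatMap_congr (fun v hv => if_pos hv)
  have h2 : (vals.drop n).flatMap (fun v => if v ∈ t then g v else []) = [] := by
    rw [List.flatMap_eq_nil_iff]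
    intro v hv
    have hnot : v ∉ t := fun hmem => (hnd'.2.2 v hmem v hv) rfl
    simp [hnot]
  rw [h1, h2, List.append_nil]

-- ===== VERDICT (by name: the statement is the Claim_ definition above) =====
theorem sort_dict_get_key_spec : Claim_equal_sort_dict_get_key := by
  intro dict k _
  unfold Spec_sort_dict_get_key sort_dict_get_key sort_dict_get_key_alt
  simp only
  rw [show (fun p : String × Int => p.2) = Prod.snd from rfl,
      show (fun p : String × Int => p.1) = Prod.fst from rfl]
  set base := PySem.List.sorted2 dict Prod.fst Prod.snd true with hbase
  set vals := PySem.List.sorted (PySem.Set.ofList (dict.map Prod.snd)) (fun v => v) true with hvalsd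
  set g : Int → List (String × Int) := fun v => base.filter (fun y => y.2 == v) with hgdef
  -- A's value set is the set of base's values
  have htmp : base.foldl (fun s item => PySem.Set.add s item.2) PySem.Set.empty
      = PySem.Set.ofList (base.map Prod.snd) := by
    rw [← PySem.Set.update_map_eq_foldl_add]; rfl
  rw [htmp, vals_base_eq_vals_dict, ← hvalsd]
  -- A's nested loops are a flatMap over the top value prefix
  have hA : (PySem.List.slice vals none (some k)).foldl
      (fun acc v => base.foldl
        (fun acc2 it => if it.2 == v then acc2 ++ [it.1] else acc2) acc) []
      = (PySem.List.slice vals none (some k)).flatMap (fun v => (g v).map Prod.fst) := by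
    rw [PySem.List.foldl_congr_mem _ _ (fun acc v => acc ++ (g v).map Prod.fst) _
      (fun acc v _ => PySem.List.foldl_append_if (fun it => it.2 == v) Prod.fst base acc)]
    rw [PySem.List.foldl_append_eq_flatMap]
    rfl
  rw [hA, PySem.List.slice_zero_start]
  -- B's ordered list is the grouping of base by descending distinct values
  have hord : PySem.List.sorted base Prod.snd true = vals.flatMap g := by
    rw [sorted_rev_groups base Prod.snd, vals_base_eq_vals_dict]
  rw [hord]
  -- B's membership filter keeps exactly the groups of the prefix
  have hslice : PySem.List.slice vals none (some k)
      = vals.take (PySem.List.clampIdx vals.length k) := by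
    simp [PySem.List.slice]
  set n := PySem.List.clampIdx vals.length k with hn
  have hfil : (vals.flatMap g).filter
      (fun kv => PySem.Set.contains (PySem.Set.ofList (PySem.List.slice vals none (some k))) kv.2)
      = (vals.take n).flatMap g := by
    rw [List.filter_flatMap]
    have hcg : ∀ v ∈ vals, (g v).filter
        (fun kv => PySem.Set.contains (PySem.Set.ofList (PySem.List.slice vals none (some k))) kv.2)
        = if v ∈ vals.take n then g v else [] := by
      intro v hv
      have hmemv : ∀ kv ∈ g v, kv.2 = v := by
        intro kv hkv; have := List.of_mem_filter hkv; simpa using this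
      have hq : ∀ kv ∈ g v, (PySem.Set.contains (PySem.Set.ofList (PySem.List.slice vals none (some k))) kv.2)
          = decide (v ∈ vals.take n) := by
        intro kv hkv
        rw [hmemv kv hkv]
        simp only [PySem.Set.contains, hslice, List.contains_eq_mem]
        simp [PySem.Set.mem_ofList]
      rw [List.filter_congr hq]
      by_cases hvt : v ∈ vals.take n
      · simp [hvt]
      · simp [hvt]
    rw [List.flatMap_congr hcg]
    exact flatMap_take_of_nodup vals
      (((PySem.List.sorted_perm _ _ _).nodup_iff).mpr (PySem.Set.nodup_ofList _)) g n
  rw [hfil, List.map_flatMap, ← hslice]
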